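-- pv_equiv track=rewrite | github.com/arturoornelasb/tibia-bonelord-469-cipher | archive/scripts/experimental/checkerboard_search.py | all_tokenizations
-- ===== SOURCE A (Python) =====
-- def all_tokenizations(text, max_len=3):
--     """Generate all possible tokenizations of text into tokens of length 1 to max_len."""
--     if not text:
--         yield []
--         return
--     for length in range(1, min(max_len + 1, len(text) + 1)):
--         token = text[:length]
--         for rest in all_tokenizations(text[length:], max_len):
--             yield [token] + rest
-- ===== SOURCE B (Python) =====
-- def all_tokenizations(text, max_len=3):
--     """Bottom-up DP over suffixes instead of naive recursion: results[i] holds all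
--     tokenizations of text[i:], computed once per suffix."""
--     n = len(text)
--     results = [None] * n + [[[]]]
--     for i in range(n - 1, -1, -1):
--         row = []
--         for length in range(1, min(max_len, n - i) + 1):
--             token = text[i:i + length]
--             for rest in results[i + length]:
--                 row.append([token] + rest)
--         results[i] = row
--     yield from results[0]
-- ===== Notes on version B (the rewrite author's own statement) =====
-- stated objective: alternative
-- what changed: Replaces the naive recursive generator with a bottom-up dynamic-programming table over suffixes (each suffix's tokenization list built once and shared), yielding the same lists in the same order.
import Mathlib
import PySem

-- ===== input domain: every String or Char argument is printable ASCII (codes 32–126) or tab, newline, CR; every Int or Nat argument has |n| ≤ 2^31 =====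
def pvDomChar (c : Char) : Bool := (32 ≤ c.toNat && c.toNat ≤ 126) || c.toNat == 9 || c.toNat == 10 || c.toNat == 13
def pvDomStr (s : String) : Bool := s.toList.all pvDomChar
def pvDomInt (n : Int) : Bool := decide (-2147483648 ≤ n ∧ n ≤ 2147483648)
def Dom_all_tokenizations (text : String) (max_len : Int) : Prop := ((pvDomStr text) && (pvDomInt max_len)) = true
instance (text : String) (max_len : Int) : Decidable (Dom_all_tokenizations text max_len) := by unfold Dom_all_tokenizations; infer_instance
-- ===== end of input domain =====

-- B replaces A's naive recursion by a bottom-up DP table over suffixes, built once per suffix and shared (objective: alternative; trades recursion for memory).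

-- ===== PORT A =====
-- Literal port of A's recursive generator, recursing on the character list of the suffix.
-- text[:length] / text[length:] with length ≥ 1 are take/drop (exact for nonnegative indices);
-- the inner dite `1 ≤ L` is a totality guard only: every L produced by the range satisfies it.
def tokA (cs : List Char) (m : Int) : List (List String) :=
  if h : cs = [] then [[]]
  else
    (PySem.List.pyRange 1 (min (m + 1) ((cs.length : Int) + 1)) 1).flatMap
      (fun L =>
        if _h1 : 1 ≤ L then
          (tokA (cs.drop L.toNat) m).map (fun rest => String.ofList (cs.take L.toNat) :: rest)
        else [])
termination_by cs.length
decreasing_by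
  have hlen : cs.length ≠ 0 := fun hz => h (List.eq_nil_of_length_eq_zero hz)
  have : 1 ≤ L.toNat := by omega
  simp only [List.length_drop]
  omega

def all_tokenizations (text : String) (max_len : Int) : List (List String) :=
  tokA text.toList max_len

-- ===== PORT B =====
-- Literal port of B's DP: the table of Source B, one row per suffix (head = results[i]), built
-- back-to-front; Source B's downward index loop becomes recursion on the suffix list.
def tblB (cs : List Char) (m : Int) : List (List (List String)) :=
  match cs with
  | [] => [[[]]]
  | c :: rest =>
    let tbl := tblB rest m
    let row := (PySem.List.pyRange 1 (min m ((c :: rest).length : Int) + 1) 1).flatMap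
      (fun L => (tbl.getD (L.toNat - 1) []).map
        (fun r => String.ofList ((c :: rest).take L.toNat) :: r))
    row :: tbl

def all_tokenizations_alt (text : String) (max_len : Int) : List (List String) :=
  (tblB text.toList max_len).headD []

-- ===== PRECONDITION & SPEC =====
def Spec_all_tokenizations (text : String) (max_len : Int) (out : List (List String)) : Prop := out = all_tokenizations_alt text max_len
instance (text : String) (max_len : Int) (out : List (List String)) : Decidable (Spec_all_tokenizations text max_len out) := by unfold Spec_all_tokenizations; infer_instance

-- ===== CLAIM (what is proved, stated in full; the proofs are below) =====
def Claim_equal_all_tokenizations : Prop := ∀ (text : String) (max_len : Int), Dom_all_tokenizations text max_len → Spec_all_tokenizations text max_len (all_tokenizations text max_len)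

-- ===== LEMMAS AND PROOFS =====

theorem tokA_nil (m : Int) : tokA [] m = [[]] := by
  unfold tokA
  rfl

-- The whole DP table equals the list of A-results for every suffix.
theorem tblB_eq_tails (cs : List Char) (m : Int) :
    tblB cs m = cs.tails.map (fun s => tokA s m) := by
  induction cs with
  | nil => simp [tblB, List.tails, tokA_nil]
  | cons c rest ih =>
    rw [tblB, List.tails_cons, List.map_cons]
    refine congrArg₂ _ ?_ ih
    -- row = tokA (c :: rest) m
    rw [tokA]
    rw [dif_neg (List.cons_ne_nil c rest)]
    have hb : min (m + 1) (((c :: rest).length : Int) + 1)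
        = min m ((c :: rest).length : Int) + 1 := by omega
    rw [hb]
    refine (List.flatMap_congr ?_).symm
    intro L hL
    rcases (PySem.List.mem_pyRange_one).mp hL with ⟨h1, h2⟩
    rw [dif_pos h1]
    have hLn : 1 ≤ L.toNat ∧ L.toNat ≤ rest.length + 1 := by
      constructor <;> [omega; · simp only [List.length_cons] at h2; omega]
    have hidx : L.toNat - 1 < rest.tails.length := by
      rw [List.length_tails]; omega
    rw [ih, List.getD_eq_getElem?_getD, List.getElem?_map,
        List.getElem?_eq_getElem hidx]
    simp only [Option.map_some, Option.getD_some, List.getElem_tails]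
    have hdrop : rest.drop (L.toNat - 1) = (c :: rest).drop L.toNat := by
      conv_rhs => rw [show L.toNat = (L.toNat - 1) + 1 from by omega]
      rw [List.drop_succ_cons]
    rw [hdrop]

-- ===== VERDICT (by name: the statement is the Claim_ definition above) =====
theorem all_tokenizations_spec : Claim_equal_all_tokenizations := by
  intro text max_len _
  unfold Spec_all_tokenizations all_tokenizations all_tokenizations_alt
  rw [tblB_eq_tails]
  cases h : text.toList with
  | nil => simp [List.tails, tokA_nil]
  | cons c rest => rw [List.tails_cons, List.map_cons, List.headD_cons]
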